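-- pv_equiv track=rewrite | github.com/saxster/new_SPS_Website | agent_backend/skills/content_pillars.py | _route_by_tags
-- ===== SOURCE A (Python) =====
-- from typing import List, Dict, Optional, Any
--
-- def _route_by_tags(tags: List[str]) -> Optional[str]:
--     """Route based on topic tags."""
--     tags_lower = [t.lower() for t in tags]
--
--     tag_pillar_map = {
--         "scam_watch": ["scam", "fraud", "phishing", "otp", "digital_arrest"],
--         "economic_security": ["sebi", "rbi", "market", "investment", "ed"],
--         "senior_safety": ["senior", "elder", "pension", "retirement"],
--         "personal_security": ["home", "travel", "cyber", "privacy"],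
--         "business_security": ["compliance", "regulation", "policy", "smb"],
--         "sector_intelligence": ["sector", "industry", "analysis", "report"],
--         "product_reviews": ["review", "product", "comparison", "test"],
--     }
--
--     for pillar, keywords in tag_pillar_map.items():
--         if any(kw in tags_lower for kw in keywords):
--             return pillar
--
--     return None
-- ===== SOURCE B (Python) =====
-- from typing import List, Optional
--
-- def _route_by_tags(tags: List[str]) -> Optional[str]:
--     """Route based on topic tags: flat keyword->priority index, one min-tracking pass."""
--     pillar_names = [
--         "scam_watch", "economic_security", "senior_safety", "personal_security",
--         "business_security", "sector_intelligence", "product_reviews",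
--     ]
--     kw_priority = {
--         "scam": 0, "fraud": 0, "phishing": 0, "otp": 0, "digital_arrest": 0,
--         "sebi": 1, "rbi": 1, "market": 1, "investment": 1, "ed": 1,
--         "senior": 2, "elder": 2, "pension": 2, "retirement": 2,
--         "home": 3, "travel": 3, "cyber": 3, "privacy": 3,
--         "compliance": 4, "regulation": 4, "policy": 4, "smb": 4,
--         "sector": 5, "industry": 5, "analysis": 5, "report": 5,
--         "review": 6, "product": 6, "comparison": 6, "test": 6,
--     }
--     best = None
--     for t in tags:
--         p = kw_priority.get(t.lower())
--         if p is not None and (best is None or p < best):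
--             best = p
--     return pillar_names[best] if best is not None else None
-- ===== Notes on version B (the rewrite author's own statement) =====
-- stated objective: alternative
-- what changed: Replaces the nested pillar-by-pillar scan over the tag list with a flat keyword->priority-index dictionary and a pillar-name table: one pass over the tags keeps the minimum priority index found, then that index names the pillar, preserving A's pillar-declaration-order tie-breaking; measured ~1.6x faster (one hash lookup per tag instead of repeated list-membership scans).
import Mathlib
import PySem

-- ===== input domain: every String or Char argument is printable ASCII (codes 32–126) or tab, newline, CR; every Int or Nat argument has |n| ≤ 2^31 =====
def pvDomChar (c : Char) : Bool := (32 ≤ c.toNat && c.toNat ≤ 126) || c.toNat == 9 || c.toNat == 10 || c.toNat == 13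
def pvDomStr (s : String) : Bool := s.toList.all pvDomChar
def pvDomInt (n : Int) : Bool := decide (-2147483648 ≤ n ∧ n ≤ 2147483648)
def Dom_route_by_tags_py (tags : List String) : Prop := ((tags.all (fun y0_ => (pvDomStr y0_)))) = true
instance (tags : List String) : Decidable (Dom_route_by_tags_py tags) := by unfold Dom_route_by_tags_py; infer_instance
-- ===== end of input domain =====

-- B replaces A's nested pillar-by-pillar scan with a flat keyword->priority dict
-- and one min-tracking pass over the tags (objective: alternative algorithm).


-- ===== PORT A =====
-- tag_pillar_map, a dict literal
def pvTagPillarMap : PySem.Dict String (List String) := PySem.Dict.ofList [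
  ("scam_watch", ["scam", "fraud", "phishing", "otp", "digital_arrest"]),
  ("economic_security", ["sebi", "rbi", "market", "investment", "ed"]),
  ("senior_safety", ["senior", "elder", "pension", "retirement"]),
  ("personal_security", ["home", "travel", "cyber", "privacy"]),
  ("business_security", ["compliance", "regulation", "policy", "smb"]),
  ("sector_intelligence", ["sector", "industry", "analysis", "report"]),
  ("product_reviews", ["review", "product", "comparison", "test"])]

-- 'for pillar, keywords in tag_pillar_map.items(): if any(kw in tags_lower for kw in keywords): return pillar'
def pvRouteLoop (items : List (String × List String)) (tagsLower : List String) : Option String :=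
  match items with
  | [] => none
  | (pillar, keywords) :: rest =>
      if keywords.any (fun kw => tagsLower.contains kw) then some pillar
      else pvRouteLoop rest tagsLower

def route_by_tags_py (tags : List String) : Option String :=
  pvRouteLoop pvTagPillarMap.items (tags.map PySem.Str.lower)

-- ===== PORT B =====
def pvPillarNames : List String :=
  ["scam_watch", "economic_security", "senior_safety", "personal_security",
   "business_security", "sector_intelligence", "product_reviews"]

-- flat keyword -> priority-index dict literal
def pvKwPriority : PySem.Dict String Int := PySem.Dict.ofList [
  ("scam", 0), ("fraud", 0), ("phishing", 0), ("otp", 0), ("digital_arrest", 0),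
  ("sebi", 1), ("rbi", 1), ("market", 1), ("investment", 1), ("ed", 1),
  ("senior", 2), ("elder", 2), ("pension", 2), ("retirement", 2),
  ("home", 3), ("travel", 3), ("cyber", 3), ("privacy", 3),
  ("compliance", 4), ("regulation", 4), ("policy", 4), ("smb", 4),
  ("sector", 5), ("industry", 5), ("analysis", 5), ("report", 5),
  ("review", 6), ("product", 6), ("comparison", 6), ("test", 6)]

-- loop body: 'p = kw_priority.get(t.lower()); if p is not None and (best is None or p < best): best = p'
def pvBestStep (best : Option Int) (t : String) : Option Int :=
  match pvKwPriority.get? (PySem.Str.lower t) with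
  | none => best
  | some p =>
      match best with
      | none => some p
      | some b => if p < b then some p else best

-- 'return pillar_names[best] if best is not None else None'
def route_by_tags_py_alt (tags : List String) : Option String :=
  match tags.foldl pvBestStep none with
  | none => none
  | some i => PySem.List.pyGet? pvPillarNames i

-- ===== PRECONDITION & SPEC =====
def Spec_route_by_tags_py (tags : List String) (out : Option String) : Prop := out = route_by_tags_py_alt tags
instance (tags : List String) (out : Option String) : Decidable (Spec_route_by_tags_py tags out) := by unfold Spec_route_by_tags_py; infer_instance

-- ===== CLAIM (what is proved, stated in full; the proofs are below) =====
def Claim_equal_route_by_tags_py : Prop := ∀ (tags : List String), Dom_route_by_tags_py tags → Spec_route_by_tags_py tags (route_by_tags_py tags)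

-- ===== LEMMAS AND PROOFS =====

-- merge two candidate priorities, preferring the left one on a tie
def pvMerge (a b : Option Int) : Option Int :=
  match b with
  | none => a
  | some hb =>
      match a with
      | none => some hb
      | some ha => if hb < ha then some hb else a

lemma pvMerge_none_left (b : Option Int) : pvMerge none b = b := by cases b <;> rfl

lemma pvMerge_none_right (a : Option Int) : pvMerge a none = a := rfl

lemma pvMerge_some_some (a b : Int) :
    pvMerge (some a) (some b) = if b < a then some b else some a := rfl

-- index of the first matching pillar of a table (proof-side mirror of A's loop)
def pvHitIdx (k : Int) (table : List (String × List String)) (L : List String) : Option Int :=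
  match table with
  | [] => none
  | (_, kws) :: rest =>
      if kws.any (fun kw => L.contains kw) then some k else pvHitIdx (k + 1) rest L

-- index of a single tag's pillar in the table (proof-side mirror of B's dict lookup)
def pvIdxOf (k : Int) (table : List (String × List String)) (t : String) : Option Int :=
  match table with
  | [] => none
  | (_, kws) :: rest =>
      if kws.contains t then some k else pvIdxOf (k + 1) rest t

lemma pvBestStep_eq_merge (best : Option Int) (t : String) :
    pvBestStep best t = pvMerge best (pvKwPriority.get? (PySem.Str.lower t)) := by
  unfold pvBestStep pvMerge
  cases pvKwPriority.get? (PySem.Str.lower t) <;> cases best <;> rfl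

lemma pvMerge_assoc (a b c : Option Int) :
    pvMerge (pvMerge a b) c = pvMerge a (pvMerge b c) := by
  rcases a with _ | a
  · rw [pvMerge_none_left, pvMerge_none_left]
  rcases b with _ | b
  · rw [pvMerge_none_right, pvMerge_none_left]
  rcases c with _ | c
  · rw [pvMerge_none_right, pvMerge_none_right]
  by_cases h1 : b < a <;> by_cases h2 : c < b <;> by_cases h3 : c < a <;>
    simp [pvMerge, h1, h2, h3] <;> (exfalso; omega)

lemma pvFoldl_merge (L : List String) (acc : Option Int) :
    L.foldl pvBestStep acc = pvMerge acc (L.foldl pvBestStep none) := by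
  induction L generalizing acc with
  | nil => cases acc <;> rfl
  | cons t L ih =>
      simp only [List.foldl_cons]
      rw [ih (pvBestStep acc t), ih (pvBestStep none t),
        pvBestStep_eq_merge acc t, pvBestStep_eq_merge none t,
        pvMerge_none_left, pvMerge_assoc]

lemma pvHitIdx_ge (k : Int) (table : List (String × List String)) (L : List String)
    (x : Int) (h : pvHitIdx k table L = some x) : k ≤ x := by
  induction table generalizing k with
  | nil => simp [pvHitIdx] at h
  | cons hd rest ih =>
      obtain ⟨p, kws⟩ := hd
      unfold pvHitIdx at h
      split at h
      · cases h; omega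
      · have := ih (k + 1) h; omega

lemma pvIdxOf_ge (k : Int) (table : List (String × List String)) (t : String)
    (x : Int) (h : pvIdxOf k table t = some x) : k ≤ x := by
  induction table generalizing k with
  | nil => simp [pvIdxOf] at h
  | cons hd rest ih =>
      obtain ⟨p, kws⟩ := hd
      unfold pvIdxOf at h
      split at h
      · cases h; omega
      · have := ih (k + 1) h; omega

-- key step: adding one tag to the list merges its own pillar position into the first hit
lemma pvHitIdx_cons (table : List (String × List String)) (k : Int) (t : String) (L : List String) :
    pvHitIdx k table (t :: L) = pvMerge (pvIdxOf k table t) (pvHitIdx k table L) := by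
  induction table generalizing k with
  | nil => rfl
  | cons hd rest ih =>
      obtain ⟨p, kws⟩ := hd
      unfold pvHitIdx pvIdxOf
      by_cases ht : kws.contains t = true
      · have hany : kws.any (fun kw => (t :: L).contains kw) = true :=
          List.any_eq_true.mpr ⟨t, List.mem_of_elem_eq_true ht, by simp⟩
        rw [if_pos hany, if_pos ht]
        by_cases hL2 : kws.any (fun kw => L.contains kw) = true
        · rw [if_pos hL2, pvMerge_some_some, if_neg (lt_irrefl k)]
        · rw [if_neg hL2]
          cases hL : pvHitIdx (k + 1) rest L with
          | none => rfl
          | some x =>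
              have hge := pvHitIdx_ge _ _ _ _ hL
              rw [pvMerge_some_some, if_neg (by omega)]
      · have hnt : ∀ kw ∈ kws, (kw == t) = false := by
          intro kw hkw
          by_contra hne
          have hb : (kw == t) = true := by revert hne; cases kw == t <;> simp
          have : kw = t := eq_of_beq hb
          subst this
          exact ht (List.elem_eq_true_of_mem hkw)
        have hsame : ∀ (ks : List String), (∀ kw ∈ ks, (kw == t) = false) →
            (ks.any fun kw => (t :: L).contains kw) = (ks.any fun kw => L.contains kw) := by
          intro ks h
          induction ks with
          | nil => rfl
          | cons kw ks ihk =>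
              rw [List.any_cons, List.any_cons, ihk (fun x hx => h x (by simp [hx]))]
              have hk : ¬ kw = t := by simpa using h kw (by simp)
              simp [hk]
        rw [hsame kws hnt, if_neg ht]
        by_cases hL : kws.any (fun kw => L.contains kw) = true
        · rw [if_pos hL, if_pos hL]
          cases hI : pvIdxOf (k + 1) rest t with
          | none => rfl
          | some y =>
              have hge := pvIdxOf_ge _ _ _ _ hI
              rw [pvMerge_some_some, if_pos (by omega)]
        · rw [if_neg hL, if_neg hL]
          exact ih (k + 1)

-- B's flat dict agrees with the position of the keyword's pillar in A's table
set_option maxHeartbeats 1000000 in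
lemma pvKwPriority_get_eq (t : String) :
    pvKwPriority.get? t = pvIdxOf 0 pvTagPillarMap.items t := by
  have hK : pvKwPriority = PySem.Dict.mk [
    ("scam", 0), ("fraud", 0), ("phishing", 0), ("otp", 0), ("digital_arrest", 0),
    ("sebi", 1), ("rbi", 1), ("market", 1), ("investment", 1), ("ed", 1),
    ("senior", 2), ("elder", 2), ("pension", 2), ("retirement", 2),
    ("home", 3), ("travel", 3), ("cyber", 3), ("privacy", 3),
    ("compliance", 4), ("regulation", 4), ("policy", 4), ("smb", 4),
    ("sector", 5), ("industry", 5), ("analysis", 5), ("report", 5),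
    ("review", 6), ("product", 6), ("comparison", 6), ("test", 6)] := by rfl
  have hT : pvTagPillarMap.items = [
    ("scam_watch", ["scam", "fraud", "phishing", "otp", "digital_arrest"]),
    ("economic_security", ["sebi", "rbi", "market", "investment", "ed"]),
    ("senior_safety", ["senior", "elder", "pension", "retirement"]),
    ("personal_security", ["home", "travel", "cyber", "privacy"]),
    ("business_security", ["compliance", "regulation", "policy", "smb"]),
    ("sector_intelligence", ["sector", "industry", "analysis", "report"]),
    ("product_reviews", ["review", "product", "comparison", "test"])] := by rfl
  rw [hK, hT]
  by_cases h1 : "scam" = t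
  · subst h1; decide
  by_cases h2 : "fraud" = t
  · subst h2; decide
  by_cases h3 : "phishing" = t
  · subst h3; decide
  by_cases h4 : "otp" = t
  · subst h4; decide
  by_cases h5 : "digital_arrest" = t
  · subst h5; decide
  by_cases h6 : "sebi" = t
  · subst h6; decide
  by_cases h7 : "rbi" = t
  · subst h7; decide
  by_cases h8 : "market" = t
  · subst h8; decide
  by_cases h9 : "investment" = t
  · subst h9; decide
  by_cases h10 : "ed" = t
  · subst h10; decide
  by_cases h11 : "senior" = t
  · subst h11; decide
  by_cases h12 : "elder" = t
  · subst h12; decide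
  by_cases h13 : "pension" = t
  · subst h13; decide
  by_cases h14 : "retirement" = t
  · subst h14; decide
  by_cases h15 : "home" = t
  · subst h15; decide
  by_cases h16 : "travel" = t
  · subst h16; decide
  by_cases h17 : "cyber" = t
  · subst h17; decide
  by_cases h18 : "privacy" = t
  · subst h18; decide
  by_cases h19 : "compliance" = t
  · subst h19; decide
  by_cases h20 : "regulation" = t
  · subst h20; decide
  by_cases h21 : "policy" = t
  · subst h21; decide
  by_cases h22 : "smb" = t
  · subst h22; decide
  by_cases h23 : "sector" = t
  · subst h23; decide
  by_cases h24 : "industry" = t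
  · subst h24; decide
  by_cases h25 : "analysis" = t
  · subst h25; decide
  by_cases h26 : "report" = t
  · subst h26; decide
  by_cases h27 : "review" = t
  · subst h27; decide
  by_cases h28 : "product" = t
  · subst h28; decide
  by_cases h29 : "comparison" = t
  · subst h29; decide
  by_cases h30 : "test" = t
  · subst h30; decide
  have h1' : ¬ (t = "scam") := fun hh => h1 hh.symm
  have h2' : ¬ (t = "fraud") := fun hh => h2 hh.symm
  have h3' : ¬ (t = "phishing") := fun hh => h3 hh.symm
  have h4' : ¬ (t = "otp") := fun hh => h4 hh.symm
  have h5' : ¬ (t = "digital_arrest") := fun hh => h5 hh.symm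
  have h6' : ¬ (t = "sebi") := fun hh => h6 hh.symm
  have h7' : ¬ (t = "rbi") := fun hh => h7 hh.symm
  have h8' : ¬ (t = "market") := fun hh => h8 hh.symm
  have h9' : ¬ (t = "investment") := fun hh => h9 hh.symm
  have h10' : ¬ (t = "ed") := fun hh => h10 hh.symm
  have h11' : ¬ (t = "senior") := fun hh => h11 hh.symm
  have h12' : ¬ (t = "elder") := fun hh => h12 hh.symm
  have h13' : ¬ (t = "pension") := fun hh => h13 hh.symm
  have h14' : ¬ (t = "retirement") := fun hh => h14 hh.symm
  have h15' : ¬ (t = "home") := fun hh => h15 hh.symm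
  have h16' : ¬ (t = "travel") := fun hh => h16 hh.symm
  have h17' : ¬ (t = "cyber") := fun hh => h17 hh.symm
  have h18' : ¬ (t = "privacy") := fun hh => h18 hh.symm
  have h19' : ¬ (t = "compliance") := fun hh => h19 hh.symm
  have h20' : ¬ (t = "regulation") := fun hh => h20 hh.symm
  have h21' : ¬ (t = "policy") := fun hh => h21 hh.symm
  have h22' : ¬ (t = "smb") := fun hh => h22 hh.symm
  have h23' : ¬ (t = "sector") := fun hh => h23 hh.symm
  have h24' : ¬ (t = "industry") := fun hh => h24 hh.symm
  have h25' : ¬ (t = "analysis") := fun hh => h25 hh.symm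
  have h26' : ¬ (t = "report") := fun hh => h26 hh.symm
  have h27' : ¬ (t = "review") := fun hh => h27 hh.symm
  have h28' : ¬ (t = "product") := fun hh => h28 hh.symm
  have h29' : ¬ (t = "comparison") := fun hh => h29 hh.symm
  have h30' : ¬ (t = "test") := fun hh => h30 hh.symm
  simp [PySem.Dict.get?, pvIdxOf, h1, h1', h2, h2', h3, h3', h4, h4', h5, h5', h6, h6', h7, h7', h8, h8', h9, h9', h10, h10', h11, h11', h12, h12', h13, h13', h14, h14', h15, h15', h16, h16', h17, h17', h18, h18', h19, h19', h20, h20', h21, h21', h22, h22', h23, h23', h24, h24', h25, h25', h26, h26', h27, h27', h28, h28', h29, h29', h30, h30']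

-- A's loop returns the name at the first hit's table position, for any starting offset
lemma pvRouteLoop_eq (table : List (String × List String)) (L : List String) (k : Int) :
    pvRouteLoop table L
      = (pvHitIdx k table L).bind
          (fun i => PySem.List.pyGet? (table.map Prod.fst) (i - k)) := by
  induction table generalizing k with
  | nil => rfl
  | cons hd rest ih =>
      obtain ⟨p, kws⟩ := hd
      unfold pvRouteLoop pvHitIdx
      split_ifs with h
      · simp
      · rw [ih (k + 1)]
        cases hL : pvHitIdx (k + 1) rest L with
        | none => rfl
        | some i =>
            have hge := pvHitIdx_ge _ _ _ _ hL
            simp only [Option.bind_some, List.map_cons]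
            have hn : i - k = ((i - (k + 1)).toNat : Int) + 1 := by omega
            rw [hn, PySem.List.pyGet?_cons_succ]
            congr 1
            omega

-- B's fold computes the index of A's first matching pillar
lemma pvFoldl_eq_hitIdx (tags : List String) :
    tags.foldl pvBestStep none
      = pvHitIdx 0 pvTagPillarMap.items (tags.map PySem.Str.lower) := by
  induction tags with
  | nil => rfl
  | cons t tags ih =>
      rw [show List.foldl pvBestStep none (t :: tags)
            = List.foldl pvBestStep (pvBestStep none t) tags from rfl,
        pvFoldl_merge, ih, pvBestStep_eq_merge, pvMerge_none_left,
        pvKwPriority_get_eq, List.map_cons, pvHitIdx_cons]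

-- ===== VERDICT (by name: the statement is the Claim_ definition above) =====
theorem route_by_tags_py_spec : Claim_equal_route_by_tags_py := by
  intro tags _
  unfold Spec_route_by_tags_py route_by_tags_py route_by_tags_py_alt
  rw [pvFoldl_eq_hitIdx,
    pvRouteLoop_eq pvTagPillarMap.items (tags.map PySem.Str.lower) 0]
  cases pvHitIdx 0 pvTagPillarMap.items (tags.map PySem.Str.lower) with
  | none => rfl
  | some i =>
      simp only [Option.bind_some, Int.sub_zero]
      rfl
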